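-- pv_equiv track=rewrite | github.com/matthew-griffin/advent-code-2021 | src/day_15.py | calcMultiGridCost
-- ===== SOURCE A (Python) =====
-- def calcMultiGridCost(grid, width, height, point):
--     x = point[0] % width
--     y = point[1] % height
--     base_cost = grid[y][x]
--     x_block = point[0] // width
--     y_block = point[1] // height
--     cost = base_cost + x_block + y_block
--     while cost > 9:
--         cost -= 9
--
--     return cost
-- ===== SOURCE B (Python) =====
-- def calcMultiGridCost(grid, width, height, point):
--     x_block, x = divmod(point[0], width)
--     y_block, y = divmod(point[1], height)
--     cost = grid[y][x] + x_block + y_block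
--     return cost - 9 * max(0, (cost - 1) // 9)
-- ===== Notes on version B (the rewrite author's own statement) =====
-- stated objective: simpler
-- what changed: Index/block extraction is done with a single divmod per axis, and the repeated-subtraction while-loop is replaced by a branch-free arithmetic reduction cost - 9*max(0, (cost-1)//9) that performs all subtractions at once.
import Mathlib
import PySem

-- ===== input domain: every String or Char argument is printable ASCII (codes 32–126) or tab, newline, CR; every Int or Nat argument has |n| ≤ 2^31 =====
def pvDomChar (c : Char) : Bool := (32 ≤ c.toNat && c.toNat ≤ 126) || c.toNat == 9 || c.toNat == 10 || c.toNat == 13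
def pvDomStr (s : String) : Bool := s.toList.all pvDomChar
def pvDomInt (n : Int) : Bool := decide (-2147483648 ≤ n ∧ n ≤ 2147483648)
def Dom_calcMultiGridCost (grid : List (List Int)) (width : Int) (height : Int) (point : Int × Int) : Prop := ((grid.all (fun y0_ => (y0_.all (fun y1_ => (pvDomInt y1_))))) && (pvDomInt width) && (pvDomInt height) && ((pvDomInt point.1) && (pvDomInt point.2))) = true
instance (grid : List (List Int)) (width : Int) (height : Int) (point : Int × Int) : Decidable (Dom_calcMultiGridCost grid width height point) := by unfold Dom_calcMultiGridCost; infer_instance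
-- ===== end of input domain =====

-- B replaces A's repeated-subtraction while-loop by a branch-free arithmetic reduction
-- (and extracts block/index with divmod); equivalence of return values on Pre_ is proved.

-- ===== PORT A =====
-- while cost > 9: cost -= 9   (literal port of A's loop)
def wrapLoop (cost : Int) : Int :=
  if 9 < cost then wrapLoop (cost - 9) else cost
termination_by cost.toNat
decreasing_by omega

def calcMultiGridCost (grid : List (List Int)) (width : Int) (height : Int) (point : Int × Int) : Int :=
  let x := PySem.Int.mod point.1 width
  let y := PySem.Int.mod point.2 height
  let base_cost := PySem.List.pyGetD (PySem.List.pyGetD grid y []) x 0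
  let x_block := PySem.Int.floordiv point.1 width
  let y_block := PySem.Int.floordiv point.2 height
  wrapLoop (base_cost + x_block + y_block)

-- ===== PORT B =====
-- divmod(a, b) → PySem.Int.divmod?; the none case (b = 0, a ZeroDivisionError in Python)
-- lies outside Pre_ and returns a default.
def calcMultiGridCost_alt (grid : List (List Int)) (width : Int) (height : Int) (point : Int × Int) : Int :=
  match PySem.Int.divmod? point.1 width, PySem.Int.divmod? point.2 height with
  | some (x_block, x), some (y_block, y) =>
    let cost := PySem.List.pyGetD (PySem.List.pyGetD grid y []) x 0 + x_block + y_block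
    cost - 9 * max 0 (PySem.Int.floordiv (cost - 1) 9)
  | _, _ => 0

-- ===== PRECONDITION & SPEC =====
-- Pre_ excludes exactly the inputs where Python A raises: zero width/height (ZeroDivisionError)
-- and wrapped indices outside the grid (IndexError).
def Pre_calcMultiGridCost (grid : List (List Int)) (width : Int) (height : Int) (point : Int × Int) : Prop :=
  width ≠ 0 ∧ height ≠ 0 ∧
  PySem.Raise.InRange grid.length (PySem.Int.mod point.2 height) ∧
  PySem.Raise.InRange (PySem.List.pyGetD grid (PySem.Int.mod point.2 height) []).length (PySem.Int.mod point.1 width)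
instance (grid : List (List Int)) (width : Int) (height : Int) (point : Int × Int) : Decidable (Pre_calcMultiGridCost grid width height point) := by unfold Pre_calcMultiGridCost; infer_instance

def pvWitness_calcMultiGridCost : List (List Int) × Int × Int × (Int × Int) := ([[5, 3], [2, 8]], 2, 2, (3, 4))

def Spec_calcMultiGridCost (grid : List (List Int)) (width : Int) (height : Int) (point : Int × Int) (out : Int) : Prop := out = calcMultiGridCost_alt grid width height point
instance (grid : List (List Int)) (width : Int) (height : Int) (point : Int × Int) (out : Int) : Decidable (Spec_calcMultiGridCost grid width height point out) := by unfold Spec_calcMultiGridCost; infer_instance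

-- ===== CLAIM (what is proved, stated in full; the proofs are below) =====
def Claim_equal_calcMultiGridCost : Prop := ∀ (grid : List (List Int)) (width : Int) (height : Int) (point : Int × Int), Dom_calcMultiGridCost grid width height point → Pre_calcMultiGridCost grid width height point → Spec_calcMultiGridCost grid width height point (calcMultiGridCost grid width height point)

-- ===== LEMMAS AND PROOFS =====
theorem wrapLoop_closed (c : Int) : wrapLoop c = c - 9 * max 0 ((c - 1) / 9) := by
  unfold wrapLoop
  split
  · rw [wrapLoop_closed (c - 9)]
    omega
  · omega
termination_by c.toNat
decreasing_by omega

-- ===== VERDICT (by name: the statement is the Claim_ definition above) =====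
theorem calcMultiGridCost_spec : Claim_equal_calcMultiGridCost := by
  intro grid width height point _ hpre
  obtain ⟨hw, hh, -, -⟩ := hpre
  unfold Spec_calcMultiGridCost calcMultiGridCost calcMultiGridCost_alt
  simp only [PySem.Int.divmod?, hw, hh, if_false, PySem.Int.mod, PySem.Int.floordiv]
  rw [wrapLoop_closed]
  have h9 : ∀ a : Int, a.fdiv 9 = a / 9 := by
    intro a; rw [Int.fdiv_eq_ediv]; simp
  simp only [h9]
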